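-- pv_equiv track=rewrite | github.com/selfreferencing/erdos-86-lean | scripts/stage8_obstruction_check.py | factor_spf
-- ===== SOURCE A (Python) =====
-- def factor_spf(n: int, spf: list[int]) -> dict[int, int]:
--     f: dict[int, int] = {}
--     while n > 1:
--         p = spf[n]
--         if p <= 1:
--             break
--         c = 0
--         while n % p == 0:
--             n //= p
--             c += 1
--         f[p] = c
--     return f
-- ===== SOURCE B (Python) =====
-- def factor_spf(n: int, spf: list[int]) -> dict[int, int]:
--     # Collect every prime factor (with repetition, ascending) in one flat loop,
--     # then tally the list into a dict in a second pass.
--     factors: list[int] = []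
--     while n > 1:
--         p = spf[n]
--         if p <= 1:
--             break
--         factors.append(p)
--         n //= p
--     counts: dict[int, int] = {}
--     for q in factors:
--         counts[q] = counts.get(q, 0) + 1
--     return counts
-- ===== Notes on version B (the rewrite author's own statement) =====
-- stated objective: alternative
-- what changed: B replaces A's nested exponent-counting loop with a flat collect-then-count decomposition: one loop appends each prime factor (one division per step) to a list, and a second pass tallies that list into the dict.
-- outside the precondition, e.g. on factor_spf(12, [0, 0, 2, 3, 0, 0, 0, 0, 0, 0, 0, 0, 2]): A returns {2: 2, 3: 1}, B returns {2: 1}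
import Mathlib
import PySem

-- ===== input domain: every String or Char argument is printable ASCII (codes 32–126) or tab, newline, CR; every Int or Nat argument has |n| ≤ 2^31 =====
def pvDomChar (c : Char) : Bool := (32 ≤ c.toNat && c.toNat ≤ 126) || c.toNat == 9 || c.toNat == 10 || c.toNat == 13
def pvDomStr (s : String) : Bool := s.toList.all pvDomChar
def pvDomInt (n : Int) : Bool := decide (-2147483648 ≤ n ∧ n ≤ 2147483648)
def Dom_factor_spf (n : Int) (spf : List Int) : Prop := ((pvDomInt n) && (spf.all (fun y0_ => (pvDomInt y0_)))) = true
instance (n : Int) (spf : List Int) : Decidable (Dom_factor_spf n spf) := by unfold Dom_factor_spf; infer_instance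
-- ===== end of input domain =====

-- B replaces A's nested exponent-counting loop with a flat collect-then-count decomposition.

-- ===== PORT A =====
-- inner 'while n % p == 0: n //= p; c += 1' (fuel makes the loop total; inside Pre_ it always suffices)
def pvAInner (p : Int) : Nat → Int → Int → Int × Int
  | 0, n, c => (n, c)
  | fuel + 1, n, c =>
    if PySem.Int.mod n p = 0 then pvAInner p fuel (PySem.Int.floordiv n p) (c + 1) else (n, c)

-- outer 'while n > 1' loop; on an IndexError input (outside Pre_) it just stops
def pvALoop (spf : List Int) : Nat → Int → PySem.Dict Int Int → PySem.Dict Int Int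
  | 0, _, f => f
  | fuel + 1, n, f =>
    if 1 < n then
      match PySem.List.pyGet? spf n with
      | none => f
      | some p =>
        if p ≤ 1 then f
        else
          let r := pvAInner p (n.toNat + 1) n 0
          pvALoop spf fuel r.1 (f.insert p r.2)
    else f

def factor_spf (n : Int) (spf : List Int) : List (Int × Int) :=
  (pvALoop spf (n.toNat + 1) n PySem.Dict.empty).items

-- ===== PORT B =====
-- flat 'while n > 1' loop collecting one prime factor per step
def pvBCollect (spf : List Int) : Nat → Int → List Int → List Int
  | 0, _, acc => acc
  | fuel + 1, n, acc =>
    if 1 < n then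
      match PySem.List.pyGet? spf n with
      | none => acc
      | some p =>
        if p ≤ 1 then acc
        else pvBCollect spf fuel (PySem.Int.floordiv n p) (acc ++ [p])
    else acc

def factor_spf_alt (n : Int) (spf : List Int) : List (Int × Int) :=
  ((pvBCollect spf (n.toNat + 1) n []).foldl
      (fun d q => d.insert q (d.getD q 0 + 1)) PySem.Dict.empty).items

-- ===== PRECONDITION & SPEC =====
-- Pre_ excludes inputs with n > 1 whose table is not a genuine smallest-prime-factor
-- table on the divisors of n (out-of-range n raises IndexError; a junk entry that is not
-- the least factor makes A diverge or makes A's exponent grouping accidental).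
-- 'spf.getD i 0 is the least factor (> 1) of i' — the defining property of an spf table entry
def pvLeastFac (spf : List Int) (i : Nat) : Bool :=
  decide (1 < spf.getD i 0) && decide (spf.getD i 0 ∣ (i : Int)) &&
    decide (∀ d : Nat, d < (spf.getD i 0).toNat → 2 ≤ d → ¬ (d : Int) ∣ (i : Int))

def Pre_factor_spf (n : Int) (spf : List Int) : Prop :=
  1 < n →
    (n < (spf.length : Int) ∧
      ∀ i : Nat, i < spf.length → 2 ≤ i → (i : Int) ∣ n → pvLeastFac spf i = true)
instance (n : Int) (spf : List Int) : Decidable (Pre_factor_spf n spf) := by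
  unfold Pre_factor_spf; infer_instance

def pvWitness_factor_spf : Int × List Int := (12, [0, 0, 2, 3, 2, 5, 2, 7, 2, 3, 2, 11, 2])

def Spec_factor_spf (n : Int) (spf : List Int) (out : List (Int × Int)) : Prop := out = factor_spf_alt n spf
instance (n : Int) (spf : List Int) (out : List (Int × Int)) : Decidable (Spec_factor_spf n spf out) := by unfold Spec_factor_spf; infer_instance

-- ===== CLAIM (what is proved, stated in full; the proofs are below) =====
def Claim_equal_factor_spf : Prop := ∀ (n : Int) (spf : List Int), Dom_factor_spf n spf → Pre_factor_spf n spf → Spec_factor_spf n spf (factor_spf n spf)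

-- ===== LEMMAS AND PROOFS =====

-- the table hypothesis carried through the induction: spf is a least-factor table on the divisors of n
def pvGood (spf : List Int) (n : Int) : Prop :=
  ∀ i : Nat, i < spf.length → 2 ≤ i → (i : Int) ∣ n → pvLeastFac spf i = true

-- the counting step of B's second pass
def pvStep (d : PySem.Dict Int Int) (q : Int) : PySem.Dict Int Int := d.insert q (d.getD q 0 + 1)

lemma pvSpf_spec (spf : List Int) (n m : Int) (hg : pvGood spf n) (h2 : 1 < m)
    (hmn : m ∣ n) (hlt : m < (spf.length : Int)) :
    PySem.List.pyGet? spf m = some (spf.getD m.toNat 0) ∧ 1 < spf.getD m.toNat 0 ∧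
      spf.getD m.toNat 0 ∣ m ∧ ∀ d : Int, 1 < d → d < spf.getD m.toNat 0 → ¬ d ∣ m := by
  have h0 : 0 ≤ m := by omega
  have hmt : m.toNat < spf.length := by omega
  have hcast : ((m.toNat : Int)) = m := Int.toNat_of_nonneg h0
  have hgm := hg m.toNat hmt (by omega) (by rw [hcast]; exact hmn)
  simp only [pvLeastFac, Bool.and_eq_true, decide_eq_true_eq] at hgm
  obtain ⟨⟨hp1, hpd⟩, hmin⟩ := hgm
  refine ⟨?_, hp1, by rwa [hcast] at hpd, ?_⟩
  · rw [PySem.List.pyGet?_of_nonneg spf h0]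
    rw [List.getElem?_eq_getElem hmt, List.getD_eq_getElem _ _ hmt]
  · intro d hd1 hdp hdm
    have h0d : 0 ≤ d := by omega
    have := hmin d.toNat (by omega) (by omega)
    rw [Int.toNat_of_nonneg h0d, hcast] at this
    exact this hdm

lemma pvBCollect_acc (spf : List Int) : ∀ (fuel : Nat) (n : Int) (acc : List Int),
    pvBCollect spf fuel n acc = acc ++ pvBCollect spf fuel n [] := by
  intro fuel
  induction fuel with
  | zero => intro n acc; simp [pvBCollect]
  | succ g ih =>
    intro n acc
    simp only [pvBCollect]
    split
    · rcases h : PySem.List.pyGet? spf n with _ | p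
      · simp
      · simp only []
        split
        · simp
        · rw [ih _ (acc ++ [p]), ih _ ([] ++ [p])]
          simp
    · simp

lemma pvPow_ge (p : Int) (hp : 2 ≤ p) (c : Nat) : (c : Int) + 1 ≤ p ^ c := by
  induction c with
  | zero => simp
  | succ k ih =>
    have hk : (1:Int) ≤ p ^ k := one_le_pow₀ (by omega)
    calc ((k:Int) + 1) + 1 ≤ p ^ k + p ^ k := by nlinarith
      _ ≤ p ^ (k + 1) := by rw [pow_succ]; nlinarith

lemma pvSize_le (p m' : Int) (hp : 2 ≤ p) (hm' : 1 ≤ m') (c : Nat) :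
    m'.toNat + c ≤ (m' * p ^ c).toNat := by
  have h1 : (c : Int) + 1 ≤ p ^ c := pvPow_ge p hp c
  have h2 : m' + (c : Int) ≤ m' * p ^ c := by nlinarith
  omega

lemma pvAInner_spec (p : Int) (hp : 2 ≤ p) : ∀ (fI : Nat) (m c0 : Int), 1 ≤ m → m.toNat < fI →
    ∃ (c : Nat) (m' : Int), pvAInner p fI m c0 = (m', c0 + (c : Int)) ∧
      m = m' * p ^ c ∧ ¬ p ∣ m' ∧ 1 ≤ m' := by
  intro fI
  induction fI with
  | zero => intro m c0 hm hf; omega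
  | succ g ih =>
    intro m c0 hm hf
    by_cases hdvd : p ∣ m
    · have hmod : PySem.Int.mod m p = 0 := (PySem.Int.mod_eq_zero_iff_dvd m p).mpr hdvd
      obtain ⟨k, hk⟩ := hdvd
      have hfd : PySem.Int.floordiv m p = k := by
        rw [PySem.Int.floordiv_eq_ediv_of_pos (by omega), hk, Int.mul_ediv_cancel_left _ (by omega)]
      have hk1 : 1 ≤ k := by nlinarith
      have hklt : k.toNat < g := by
        have : k < m := by nlinarith
        omega
      obtain ⟨c', m', heq, hfac, hnd, hm'⟩ := ih k (c0 + 1) hk1 hklt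
      refine ⟨c' + 1, m', ?_, ?_, hnd, hm'⟩
      · simp only [pvAInner, hmod, hfd, heq]
        exact Prod.ext rfl (by push_cast; ring)
      · rw [hk, hfac, pow_succ]; ring
    · have hmod : PySem.Int.mod m p ≠ 0 := fun h => hdvd ((PySem.Int.mod_eq_zero_iff_dvd m p).mp h)
      exact ⟨0, m, by simp [pvAInner, hmod], by simp, hdvd, hm⟩

lemma pvBCollect_dvd (spf : List Int) (n : Int) (h1 : 1 ≤ n) (hlen : n < (spf.length : Int))
    (hg : pvGood spf n) : ∀ (fB : Nat) (m : Int), 1 ≤ m → m ∣ n →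
    ∀ q ∈ pvBCollect spf fB m [], q ∣ m := by
  intro fB
  induction fB with
  | zero => intro m _ _ q hq; simp [pvBCollect] at hq
  | succ g ih =>
    intro m hm hmn q hq
    by_cases h2 : 1 < m
    · have hmlen : m < (spf.length : Int) := lt_of_le_of_lt (Int.le_of_dvd (by omega) hmn) hlen
      obtain ⟨hget, hp1, hpd, _⟩ := pvSpf_spec spf n m hg h2 hmn hmlen
      set p := spf.getD m.toNat 0 with hpdef
      simp only [pvBCollect, if_pos h2, hget] at hq
      rw [if_neg (by omega)] at hq
      rw [List.nil_append, pvBCollect_acc] at hq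
      obtain ⟨k, hk⟩ := hpd
      have hfd : PySem.Int.floordiv m p = k := by
        rw [PySem.Int.floordiv_eq_ediv_of_pos (by omega), hk, Int.mul_ediv_cancel_left _ (by omega)]
      rw [hfd] at hq
      simp only [List.cons_append, List.nil_append, List.mem_cons] at hq
      rcases hq with hq | hq
      · rw [hq]; exact ⟨k, hk⟩
      · have hk1 : 1 ≤ k := by nlinarith
        have hkm : k ∣ m := ⟨p, by rw [hk]; ring⟩
        have := ih k hk1 (dvd_trans hkm hmn) q hq
        exact dvd_trans this hkm
    · simp [pvBCollect, if_neg h2] at hq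

lemma pvBSteps (spf : List Int) (n : Int) (hg : pvGood spf n) (h1 : 1 ≤ n)
    (hlen : n < (spf.length : Int)) (p m' : Int) (hp : 2 ≤ p) (hm' : 1 ≤ m') :
    ∀ (c fB : Nat), (m' * p ^ c) ∣ n → (∀ d : Int, 1 < d → d < p → ¬ d ∣ (m' * p ^ c)) →
      (m' * p ^ c).toNat < fB →
      pvBCollect spf fB (m' * p ^ c) [] = List.replicate c p ++ pvBCollect spf (fB - c) m' [] := by
  intro c
  induction c with
  | zero => intro fB _ _ _; simp
  | succ k ih =>
    intro fB hdn hmin hf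
    set m := m' * p ^ (k + 1) with hmdef
    have hppow : (1:Int) ≤ p ^ k := one_le_pow₀ (by omega)
    have h2 : 1 < m := by
      have : (2:Int) ≤ p ^ (k+1) := by
        calc (2:Int) ≤ p := hp
          _ = p ^ 1 := (pow_one p).symm
          _ ≤ p ^ (k+1) := pow_le_pow_right₀ (by omega) (by omega)
      nlinarith
    obtain ⟨g, rfl⟩ : ∃ g, fB = g + 1 := ⟨fB - 1, by omega⟩
    have hmlen : m < (spf.length : Int) := lt_of_le_of_lt (Int.le_of_dvd (by omega) hdn) hlen
    obtain ⟨hget, hq1, hqd, hqmin⟩ := pvSpf_spec spf n m hg h2 hdn hmlen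
    set q := spf.getD m.toNat 0 with hqdef
    -- q = p : both are the least factor of m
    have hpm : p ∣ m := ⟨m' * p ^ k, by rw [hmdef, pow_succ]; ring⟩
    have hqp : q = p := by
      have hnlt1 : ¬ q < p := fun h => hmin q hq1 h hqd
      have hnlt2 : ¬ p < q := fun h => hqmin p (by omega) h hpm
      omega
    have hfd : PySem.Int.floordiv m p = m' * p ^ k := by
      rw [PySem.Int.floordiv_eq_ediv_of_pos (by omega), hmdef, pow_succ]
      rw [show m' * (p ^ k * p) = (m' * p ^ k) * p by ring, Int.mul_ediv_cancel _ (by omega)]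
    simp only [pvBCollect, if_pos h2, hget, hqp, if_neg (by omega : ¬ p ≤ 1)]
    rw [List.nil_append, pvBCollect_acc]
    have hrec := ih g (dvd_trans ⟨p, by rw [hmdef, pow_succ]; ring⟩ hdn)
      (fun d hd1 hdp hdm => hmin d hd1 hdp (dvd_trans hdm ⟨p, by rw [hmdef, pow_succ]; ring⟩))
      (by
        have hlt : m' * p ^ k < m := by
          have h1' : (1:Int) ≤ m' * p ^ k := by nlinarith
          rw [hmdef, pow_succ]
          nlinarith
        omega)
    rw [hfd, hrec, show g + 1 - (k + 1) = g - k from by omega]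
    simp [List.replicate_succ]

lemma pvFold_replicate (p k : Int) : ∀ (c : Nat),
    (List.replicate c p).foldl pvStep (PySem.Dict.mk [(p, k)]) = PySem.Dict.mk [(p, k + c)] := by
  intro c
  induction c generalizing k with
  | zero => simp
  | succ n ih =>
    rw [List.replicate_succ, List.foldl_cons]
    have hstep : pvStep (PySem.Dict.mk [(p, k)]) p = PySem.Dict.mk [(p, k + 1)] := by
      simp [pvStep, PySem.Dict.insert, PySem.Dict.getD, PySem.Dict.get?]
    rw [hstep, ih (k + 1), show (k + 1) + (n : Int) = k + ((n + 1 : Nat) : Int) from by push_cast; ring]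

lemma pvFold_fresh_head : ∀ (l : List Int) (e : Int × Int) (d : List (Int × Int)),
    (∀ q ∈ l, q ≠ e.1) →
    (l.foldl pvStep (PySem.Dict.mk (e :: d))).items = e :: (l.foldl pvStep (PySem.Dict.mk d)).items := by
  intro l
  induction l with
  | nil => intro e d _; rfl
  | cons q t ih =>
    intro e d hfr
    have hq : q ≠ e.1 := hfr q (by simp)
    have hstep : pvStep (PySem.Dict.mk (e :: d)) q
        = PySem.Dict.mk (e :: (pvStep (PySem.Dict.mk d) q).items) := by
      simp only [pvStep, PySem.Dict.insert, PySem.Dict.getD, PySem.Dict.get?, PySem.Dict.contains,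
        List.any_cons, List.find?, show (e.1 == q) = false from by simp [Ne.symm hq], Bool.false_or]
      split
      · simp only [List.map_cons]
        rw [if_neg (show ¬ ((e.1 == q) = true) from by simp [Ne.symm hq])]
      · rfl
    rw [List.foldl_cons, hstep, ih _ _ (fun r hr => hfr r (by simp [hr]))]
    rw [List.foldl_cons]

lemma pvCount_group (p : Int) (c : Nat) (hc : 1 ≤ c) (rest : List Int) (hrest : ∀ q ∈ rest, q ≠ p) :
    ((List.replicate c p ++ rest).foldl pvStep PySem.Dict.empty).items =
      (p, (c : Int)) :: (rest.foldl pvStep PySem.Dict.empty).items := by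
  obtain ⟨k, rfl⟩ : ∃ k, c = k + 1 := ⟨c - 1, by omega⟩
  rw [List.foldl_append, List.replicate_succ, List.foldl_cons]
  have h1 : pvStep PySem.Dict.empty p = PySem.Dict.mk [(p, 1)] := rfl
  rw [h1, pvFold_replicate p 1 k,
    show (1 : Int) + (k : Int) = ((k + 1 : Nat) : Int) from by push_cast; ring,
    pvFold_fresh_head rest (p, ((k + 1 : Nat) : Int)) [] (fun q hq => hrest q hq)]
  rfl

lemma pvMain (spf : List Int) (n : Int) (h1 : 1 ≤ n) (hlen : n < (spf.length : Int))
    (hg : pvGood spf n) : ∀ (fA : Nat) (m : Int) (fB : Nat) (f : PySem.Dict Int Int),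
    m.toNat < fA → m.toNat < fB → 1 ≤ m → m ∣ n → (∀ e ∈ f.items, ¬ e.1 ∣ m) →
    (pvALoop spf fA m f).items =
      f.items ++ ((pvBCollect spf fB m []).foldl pvStep PySem.Dict.empty).items := by
  intro fA
  induction fA with
  | zero => intro m fB f hfA _ hm _ _; omega
  | succ g ih =>
    intro m fB f hfA hfB hm hmn hkeys
    by_cases h2 : 1 < m
    · have hmlen : m < (spf.length : Int) := lt_of_le_of_lt (Int.le_of_dvd (by omega) hmn) hlen
      obtain ⟨hget, hp1, hpd, hpmin⟩ := pvSpf_spec spf n m hg h2 hmn hmlen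
      set p := spf.getD m.toNat 0 with hpdef
      obtain ⟨c, m', hinner, hfac, hnd, hm'1⟩ :=
        pvAInner_spec p (by omega) (m.toNat + 1) m 0 (by omega) (by omega)
      have hc1 : 1 ≤ c := by
        rcases Nat.eq_zero_or_pos c with hc | hc
        · exfalso; apply hnd
          rw [hc, pow_zero, mul_one] at hfac
          rw [← hfac]; exact hpd
        · omega
      have hsz : m'.toNat + c ≤ m.toNat := by
        have := pvSize_le p m' (by omega) hm'1 c
        rw [← hfac] at this; exact this
      have hm'n : m' ∣ n := dvd_trans ⟨p ^ c, hfac⟩ hmn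
      -- A takes one outer step
      have hA : pvALoop spf (g + 1) m f = pvALoop spf g m' (f.insert p (c : Int)) := by
        simp only [pvALoop, if_pos h2, hget, if_neg (show ¬ p ≤ 1 from by omega), hinner, zero_add]
      -- the key p is fresh in f
      have hnc : f.contains p = false := by
        by_contra hcon
        have : p ∈ f.keys := (PySem.Dict.contains_iff_mem_keys f p).mp (by
          cases hcc : f.contains p
          · exact absurd hcc hcon
          · rfl)
        obtain ⟨e, he, hep⟩ := List.mem_map.mp this
        exact hkeys e he (hep ▸ hpd)
      have hins : (f.insert p (c : Int)).items = f.items ++ [(p, (c : Int))] := by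
        rw [PySem.Dict.items_insert]; simp [hnc]
      -- B emits the run of p's
      have hB : pvBCollect spf fB m [] =
          List.replicate c p ++ pvBCollect spf (fB - c) m' [] := by
        have := pvBSteps spf n hg h1 hlen p m' (by omega) hm'1 c fB
          (by rw [← hfac]; exact hmn) (by rw [← hfac]; exact hpmin) (by rw [← hfac]; exact hfB)
        rw [← hfac] at this; exact this
      have hfr : ∀ q ∈ pvBCollect spf (fB - c) m' [], q ≠ p := by
        intro q hq hqp
        have : q ∣ m' := pvBCollect_dvd spf n h1 hlen hg (fB - c) m' hm'1 hm'n q hq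
        exact hnd (hqp ▸ this)
      rw [hA, ih m' (fB - c) (f.insert p (c : Int)) (by omega) (by omega) hm'1 hm'n ?keys,
        hins, hB, pvCount_group p c hc1 _ hfr]
      · simp
      case keys =>
        intro e he
        rcases (PySem.Dict.mem_items_insert _ _ _ _).mp he with rfl | ⟨hmem, hne⟩
        · exact hnd
        · intro hdvd; exact hkeys e hmem (dvd_trans hdvd ⟨p ^ c, hfac⟩)
    · have hfB1 : ∃ fB', fB = fB' + 1 := ⟨fB - 1, by omega⟩
      obtain ⟨fB', rfl⟩ := hfB1
      simp [pvALoop, pvBCollect, h2, PySem.Dict.empty]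

-- ===== VERDICT =====
theorem factor_spf_spec : Claim_equal_factor_spf := by
  intro n spf _ hpre
  unfold Spec_factor_spf factor_spf factor_spf_alt
  by_cases h2 : 1 < n
  · obtain ⟨hlen, hg⟩ := hpre h2
    have hmain := pvMain spf n (by omega) hlen hg (n.toNat + 1) n (n.toNat + 1)
      PySem.Dict.empty (by omega) (by omega) (by omega) dvd_rfl
      (by intro e he; simp [PySem.Dict.empty] at he)
    simpa [pvStep, PySem.Dict.empty] using hmain
  · simp [pvALoop, pvBCollect, h2, PySem.Dict.empty]
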